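-- pv_equiv track=rewrite | github.com/wherby/code | contest/00000c443d154/d168/q2/t2.py | maxSumOfSquares
-- ===== SOURCE A (Python) =====
-- def maxSumOfSquares(num: int, sum: int) -> str:
--     if num*9 < sum:
--         return ""
--     k = sum//9
--     r = sum%9
--     ls =[9]*k + [r] + [0]*(num -k-1)
--     ls =[str(a) for a in ls][:num]
--     return "".join(ls)
-- ===== SOURCE B (Python) =====
-- def maxSumOfSquares(num: int, sum: int) -> str:
--     # Greedy digit-by-digit fill; returns "" when sum is out of the achievable
--     # range [0, 9*num] (A returns accidental strings for negative sum).
--     if sum < 0 or 9 * num < sum: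
--         return ""
--     out = []
--     remaining = sum
--     n = num
--     while n > 0:
--         d = min(9, remaining)
--         out.append(str(d))
--         remaining -= d
--         n -= 1
--     return "".join(out)
-- ===== Notes on version B (the rewrite author's own statement) =====
-- stated objective: alternative
-- what changed: B builds the string greedily digit by digit with min(9, remaining) in a single loop instead of computing the whole digit list from sum//9 and sum%9 plus list arithmetic and slicing; B also validates 0 <= sum <= 9*num up front.
-- intended difference: For negative sum (with num >= 1, or num < 0 and sum < 18*num) A's floor-div/mod arithmetic returns an accidental digit string such as '8' for (1,-1) whose digits do not sum to sum; B returns '', the intended answer since a digit sum can never be negative. — e.g. on maxSumOfSquares(1, -1): A returns "8", B returns ""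
import Mathlib
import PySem

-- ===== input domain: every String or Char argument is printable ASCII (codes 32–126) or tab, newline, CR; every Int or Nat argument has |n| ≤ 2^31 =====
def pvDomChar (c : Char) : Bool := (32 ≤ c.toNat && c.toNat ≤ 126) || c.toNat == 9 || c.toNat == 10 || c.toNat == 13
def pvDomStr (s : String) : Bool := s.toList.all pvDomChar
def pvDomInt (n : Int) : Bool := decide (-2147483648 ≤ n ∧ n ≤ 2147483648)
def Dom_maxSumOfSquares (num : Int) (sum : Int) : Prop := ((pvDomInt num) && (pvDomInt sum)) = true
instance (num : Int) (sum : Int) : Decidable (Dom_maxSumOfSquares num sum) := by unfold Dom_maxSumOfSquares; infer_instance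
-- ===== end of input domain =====

-- B fills the string greedily digit by digit (min(9, remaining)) instead of computing the
-- whole digit list from //9 and %9; B additionally rejects negative sums (see D_ below).

-- ===== PORT A =====
def maxSumOfSquares (num : Int) (sum : Int) : String :=
  if num * 9 < sum then ""
  else
    let k := PySem.Int.floordiv sum 9
    let r := PySem.Int.mod sum 9
    let ls : List Int := List.replicate k.toNat 9 ++ [r] ++ List.replicate (num - k - 1).toNat 0
    let ls2 : List String := PySem.List.slice (ls.map PySem.Int.toStr) none (some num)
    PySem.Str.join "" ls2

-- ===== PORT B =====
-- the Python while-loop 'while n > 0: …; n -= 1' as recursion on n.toNat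
def altLoop : Nat → Int → List String → List String
  | 0, _, out => out
  | n + 1, remaining, out =>
    let d := min 9 remaining
    altLoop n (remaining - d) (out ++ [PySem.Int.toStr d])

def maxSumOfSquares_alt (num : Int) (sum : Int) : String :=
  if sum < 0 ∨ 9 * num < sum then ""
  else PySem.Str.join "" (altLoop num.toNat sum [])

-- ===== PRECONDITION & SPEC =====
-- For negative sum (with num ≥ 1, or num < 0 and sum < 18*num) A's Python floor-div/mod
-- arithmetic returns an accidental digit string such as '80' whose digits do not sum to sum;
-- B returns '' there, the intended answer since a digit sum can never be negative.
def D_maxSumOfSquares (num : Int) (sum : Int) : Prop :=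
  sum < 0 ∧ (1 ≤ num ∨ (num < 0 ∧ sum < 18 * num))
instance (num : Int) (sum : Int) : Decidable (D_maxSumOfSquares num sum) := by
  unfold D_maxSumOfSquares; infer_instance

def Spec_maxSumOfSquares (num : Int) (sum : Int) (out : String) : Prop :=
  ¬ D_maxSumOfSquares num sum → out = maxSumOfSquares_alt num sum
instance (num : Int) (sum : Int) (out : String) : Decidable (Spec_maxSumOfSquares num sum out) := by
  unfold Spec_maxSumOfSquares; infer_instance

def pvDiffWitness_maxSumOfSquares : Int × Int := (1, -1)
def pvDiffWitnessOut_maxSumOfSquares : String × String := ("8", "")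

-- ===== CLAIM (what is proved, stated in full; the proofs are below) =====
def Claim_unchanged_maxSumOfSquares : Prop := ∀ (num : Int) (sum : Int), Dom_maxSumOfSquares num sum → Spec_maxSumOfSquares num sum (maxSumOfSquares num sum)
def Claim_changed_maxSumOfSquares : Prop := Dom_maxSumOfSquares (pvDiffWitness_maxSumOfSquares.1) (pvDiffWitness_maxSumOfSquares.2) ∧ D_maxSumOfSquares (pvDiffWitness_maxSumOfSquares.1) (pvDiffWitness_maxSumOfSquares.2) ∧ maxSumOfSquares (pvDiffWitness_maxSumOfSquares.1) (pvDiffWitness_maxSumOfSquares.2) = pvDiffWitnessOut_maxSumOfSquares.1 ∧ maxSumOfSquares_alt (pvDiffWitness_maxSumOfSquares.1) (pvDiffWitness_maxSumOfSquares.2) = pvDiffWitnessOut_maxSumOfSquares.2 ∧ pvDiffWitnessOut_maxSumOfSquares.1 ≠ pvDiffWitnessOut_maxSumOfSquares.2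
def Claim_exact_maxSumOfSquares : Prop := ∀ (num : Int) (sum : Int), Dom_maxSumOfSquares num sum → D_maxSumOfSquares num sum → maxSumOfSquares num sum ≠ maxSumOfSquares_alt num sum

-- ===== LEMMAS AND PROOFS =====

theorem altLoop_acc (n : Nat) : ∀ (s : Int) (out : List String),
    altLoop n s out = out ++ altLoop n s [] := by
  induction n with
  | zero => intro s out; simp [altLoop]
  | succ n ih =>
    intro s out
    simp only [altLoop]
    rw [ih, ih (s - min 9 s) ([] ++ [PySem.Int.toStr (min 9 s)])]
    simp

theorem altLoop_zero (n : Nat) :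
    altLoop n 0 [] = List.replicate n (PySem.Int.toStr 0) := by
  induction n with
  | zero => simp [altLoop]
  | succ n ih =>
    simp only [altLoop]
    rw [altLoop_acc]
    simp [ih, List.replicate_succ]

theorem key_lemma (n : Nat) : ∀ s : Int, 0 ≤ s → s ≤ 9 * n →
    ((List.replicate (PySem.Int.floordiv s 9).toNat (9:Int) ++ [PySem.Int.mod s 9] ++
        List.replicate ((n : Int) - PySem.Int.floordiv s 9 - 1).toNat (0:Int)).map
      PySem.Int.toStr).take n = altLoop n s [] := by
  induction n with
  | zero =>
    intro s h0 h9
    simp [altLoop]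
  | succ n ih =>
    intro s h0 h9
    rw [PySem.Int.floordiv_eq_ediv_of_pos (by norm_num), PySem.Int.mod_eq_emod_of_pos (by norm_num)]
    by_cases h : 9 ≤ s
    · -- first digit is 9
      have ih9 := ih (s - 9) (by omega) (by push_cast at h9 ⊢; omega)
      rw [PySem.Int.floordiv_eq_ediv_of_pos (by norm_num),
          PySem.Int.mod_eq_emod_of_pos (by norm_num)] at ih9
      have htn : (s / 9).toNat = ((s - 9) / 9).toNat + 1 := by omega
      have hmod : s % 9 = (s - 9) % 9 := by omega
      have hc : ((n + 1 : Nat) : Int) - s / 9 - 1 = (n : Int) - (s - 9) / 9 - 1 := by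
        push_cast; omega
      have hstep : altLoop (n + 1) s [] = PySem.Int.toStr 9 :: altLoop n (s - 9) [] := by
        have hmin : min (9:Int) s = 9 := by omega
        simp only [altLoop, hmin]
        rw [altLoop_acc]
        simp
      rw [htn, hmod, hc, hstep, List.replicate_succ, ← ih9]
      simp
    · -- first digit is s itself
      have hdiv : s / 9 = 0 := by omega
      have hmod : s % 9 = s := by omega
      have hc : (((n + 1 : Nat) : Int) - 0 - 1).toNat = n := by push_cast; omega
      have hstep : altLoop (n + 1) s [] = PySem.Int.toStr s :: altLoop n 0 [] := by
        have hmin : min (9:Int) s = s := by omega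
        simp only [altLoop, hmin]
        rw [altLoop_acc]
        simp
      rw [hdiv, hmod, hc, hstep, altLoop_zero]
      simp [List.take_replicate]

theorem A_empty_of_neg (num sum : Int) (hs : sum < 0) (hnum : num = 0 ∨ (num < 0 ∧ 18 * num ≤ sum)) :
    maxSumOfSquares num sum = "" := by
  unfold maxSumOfSquares
  by_cases hg : num * 9 < sum
  · rw [if_pos hg]
  · rw [if_neg hg]
    dsimp only
    have hk : PySem.Int.floordiv sum 9 < 0 :=
      (PySem.Int.floordiv_lt_iff_lt_mul (by norm_num)).mpr (by omega)
    rcases hnum with h0 | ⟨hneg, h18⟩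
    · subst h0
      rw [PySem.List.slice_to _ le_rfl]
      simp [PySem.Str.join, PySem.Chars.join_nil]
    · have hk2 : 2 * num ≤ PySem.Int.floordiv sum 9 :=
        (PySem.Int.le_floordiv_iff_mul_le (by norm_num)).mpr (by omega)
      obtain ⟨m, hm, hmpos⟩ : ∃ m : Nat, num = -((m : Nat) : Int) ∧ 0 < m :=
        ⟨(-num).toNat, by omega, by omega⟩
      subst hm
      rw [PySem.List.slice_to_neg_natCast _ _ hmpos]
      have hlen : ((List.replicate (PySem.Int.floordiv sum 9).toNat (9:Int) ++ [PySem.Int.mod sum 9] ++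
          List.replicate (-((m : Nat) : Int) - PySem.Int.floordiv sum 9 - 1).toNat (0:Int)).map PySem.Int.toStr).length
          = (-((m : Nat) : Int) - PySem.Int.floordiv sum 9 - 1).toNat + 1 := by
        simp [List.length_replicate]; omega
      rw [List.take_eq_nil_iff.mpr (by omega)]
      simp [PySem.Str.join, PySem.Chars.join_nil]

-- ===== VERDICT (by name: the statement is the Claim_ definition above) =====
theorem maxSumOfSquares_spec : Claim_unchanged_maxSumOfSquares := by
  intro num sum _
  unfold Spec_maxSumOfSquares
  intro hD'
  unfold D_maxSumOfSquares at hD'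
  push Not at hD'
  by_cases hs : sum < 0
  · obtain ⟨h1, h2⟩ := hD' hs
    rw [A_empty_of_neg num sum hs (by omega)]
    unfold maxSumOfSquares_alt
    rw [if_pos (Or.inl hs)]
  · push Not at hs
    by_cases hg : 9 * num < sum
    · unfold maxSumOfSquares maxSumOfSquares_alt
      rw [if_pos (by omega : num * 9 < sum), if_pos (Or.inr hg)]
    · unfold maxSumOfSquares maxSumOfSquares_alt
      rw [if_neg (by omega : ¬ num * 9 < sum), if_neg (by push Not; exact ⟨by omega, by omega⟩)]
      dsimp only
      have hn0 : 0 ≤ num := by omega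
      have hnum : num = ((num.toNat : Nat) : Int) := by omega
      rw [hnum, PySem.List.slice_to_natCast]
      rw [key_lemma num.toNat sum hs (by omega)]
      congr 2

theorem maxSumOfSquares_changed : Claim_changed_maxSumOfSquares := by
  unfold Claim_changed_maxSumOfSquares; decide

theorem maxSumOfSquares_tight : Claim_exact_maxSumOfSquares := by
  intro num sum _ hD
  obtain ⟨hs, hcase⟩ := hD
  have hB : maxSumOfSquares_alt num sum = "" := by
    unfold maxSumOfSquares_alt; rw [if_pos (Or.inl hs)]
  rw [hB]
  have hk : PySem.Int.floordiv sum 9 < 0 :=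
    (PySem.Int.floordiv_lt_iff_lt_mul (by norm_num)).mpr (by omega)
  have hr0 : 0 ≤ PySem.Int.mod sum 9 := by
    rw [PySem.Int.mod_eq_emod_of_pos (by norm_num)]; omega
  have hr9 : PySem.Int.mod sum 9 < 9 := by
    rw [PySem.Int.mod_eq_emod_of_pos (by norm_num)]; omega
  have hg : ¬ num * 9 < sum := by
    rcases hcase with h1 | ⟨hneg, h18⟩ <;> nlinarith
  unfold maxSumOfSquares
  rw [if_neg hg]
  dsimp only
  have hka : (PySem.Int.floordiv sum 9).toNat = 0 := by omega
  rw [hka]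
  set r := PySem.Int.mod sum 9 with hrdef
  set b := (num - PySem.Int.floordiv sum 9 - 1).toNat with hbdef
  have hform : ∃ rest : List String,
      PySem.List.slice ((List.replicate 0 (9:Int) ++ [r] ++ List.replicate b (0:Int)).map
        PySem.Int.toStr) none (some num) = PySem.Int.toStr r :: rest := by
    rcases hcase with h1 | ⟨hneg, h18⟩
    · have hnum : num = ((num.toNat : Nat) : Int) := by omega
      rw [hnum, PySem.List.slice_to_natCast]
      obtain ⟨m, hm⟩ : ∃ m : Nat, num.toNat = m + 1 := ⟨num.toNat - 1, by omega⟩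
      rw [hm]
      refine ⟨List.replicate (min m b) (PySem.Int.toStr 0), ?_⟩
      simp [List.take_replicate]
    · have hk2 : PySem.Int.floordiv sum 9 < 2 * num :=
        (PySem.Int.floordiv_lt_iff_lt_mul (by norm_num)).mpr (by omega)
      obtain ⟨m, hm, hmpos⟩ : ∃ m : Nat, num = -((m : Nat) : Int) ∧ 0 < m :=
        ⟨(-num).toNat, by omega, by omega⟩
      rw [hm, PySem.List.slice_to_neg_natCast _ _ hmpos]
      have hbge : m ≤ b := by rw [hbdef, hm]; omega
      have hlen : ((List.replicate 0 (9:Int) ++ [r] ++ List.replicate b (0:Int)).map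
          PySem.Int.toStr).length = b + 1 := by simp
      have hj : ((List.replicate 0 (9:Int) ++ [r] ++ List.replicate b (0:Int)).map
          PySem.Int.toStr).length - m = (b - m) + 1 := by omega
      rw [hj]
      refine ⟨List.replicate (min (b - m) b) (PySem.Int.toStr 0), ?_⟩
      simp [List.take_replicate]
  obtain ⟨rest, hrest⟩ := hform
  rw [hrest]
  intro h
  have hchars := congrArg String.toList h
  rw [PySem.Str.toList_join] at hchars
  have hne : PySem.Int.toChars r ≠ [] := by
    interval_cases r <;> decide
  cases rest with
  | nil =>
    rw [List.map_singleton, PySem.Chars.join_singleton, PySem.Int.toList_toStr] at hchars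
    simp at hchars
    exact hne hchars
  | cons q rest' =>
    rw [List.map_cons, List.map_cons, PySem.Chars.join_cons_cons] at hchars
    simp at hchars
    exact hne hchars.1
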